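-- pv_equiv track=rewrite | github.com/adrianco/consciousness | consciousness/security/config.py | sanitize_log_message
-- ===== SOURCE A (Python) =====
-- def sanitize_log_message(message: str) -> str:
--     """Sanitize log message to prevent log injection."""
--     if not message:
--         return ""
--
--     # Remove line breaks and control characters
--     sanitized = message.replace("\n", " ").replace("\r", " ")
--     sanitized = "".join(
--         char for char in sanitized if ord(char) >= 32 or char == " "
--     )
--
--     # Truncate if too long
--     return sanitized[:1000] if len(sanitized) > 1000 else sanitized
-- ===== SOURCE B (Python) =====
-- _SANITIZE_TABLE = {i: (" " if i in (10, 13) else None) for i in range(32)}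
--
--
-- def sanitize_log_message(message: str) -> str:
--     if not message:
--         return ""
--     return message.translate(_SANITIZE_TABLE)[:1000]
-- ===== Notes on version B (the rewrite author's own statement) =====
-- stated objective: faster
-- what changed: Replaces the two chained str.replace passes plus a char-by-char filtering generator/join with a translation table precomputed once over range(32) and a single C-level str.translate pass followed by an unconditional [:1000] truncation.
import Mathlib
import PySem

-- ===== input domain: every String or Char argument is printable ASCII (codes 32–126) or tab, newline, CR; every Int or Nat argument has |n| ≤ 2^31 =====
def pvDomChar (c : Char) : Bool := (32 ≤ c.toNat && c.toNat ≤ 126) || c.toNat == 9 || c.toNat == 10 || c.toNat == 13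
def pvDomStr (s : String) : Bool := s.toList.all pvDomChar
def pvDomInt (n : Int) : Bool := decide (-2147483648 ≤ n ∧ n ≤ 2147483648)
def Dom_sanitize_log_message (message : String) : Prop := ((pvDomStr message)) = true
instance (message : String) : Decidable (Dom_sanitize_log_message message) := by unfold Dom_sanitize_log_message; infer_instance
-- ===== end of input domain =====

-- B builds a translation table once and sanitizes in a single translate pass instead of A's two replace passes plus a filtering comprehension; same result.

-- ===== PORT A =====
def sanitize_log_message (message : String) : String :=
  if message = "" then ""
  else
    let sanitized := PySem.Str.replace (PySem.Str.replace message "\n" " ") "\r" " "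
    let sanitized := String.ofList (sanitized.toList.filter (fun c => decide (32 ≤ c.toNat) || c == ' '))
    if 1000 < PySem.Str.len sanitized then
      String.ofList (PySem.List.slice sanitized.toList none (some 1000))
    else sanitized

-- ===== PORT B =====
-- the module-level dict comprehension {i: (" " if i in (10,13) else None) for i in range(32)}
def pvSanitizeTable : PySem.Dict Int (Option Char) :=
  (PySem.List.pyRange 0 32 1).foldl
    (fun d i => d.insert i (if i == 10 || i == 13 then some ' ' else none))
    (PySem.Dict.mk [])

-- str.translate is not in PySem: ported by hand, exact for a table keyed by code points —
-- per character: absent key keeps the char, value None deletes it, a char value replaces it.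
def pvStep (table : PySem.Dict Int (Option Char)) (c : Char) : List Char :=
  match table.get? (c.toNat : Int) with
  | none => [c]            -- key absent: character passes through
  | some none => []        -- mapped to None: deleted
  | some (some r) => [r]   -- mapped to a character

def pvTranslate (table : PySem.Dict Int (Option Char)) (cs : List Char) : List Char :=
  cs.flatMap (pvStep table)

def sanitize_log_message_alt (message : String) : String :=
  if message = "" then ""
  else
    String.ofList (PySem.List.slice (pvTranslate pvSanitizeTable message.toList) none (some 1000))

-- ===== PRECONDITION & SPEC =====
def Spec_sanitize_log_message (message : String) (out : String) : Prop := out = sanitize_log_message_alt message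
instance (message : String) (out : String) : Decidable (Spec_sanitize_log_message message out) := by unfold Spec_sanitize_log_message; infer_instance

-- ===== CLAIM (what is proved, stated in full; the proofs are below) =====
def Claim_equal_sanitize_log_message : Prop := ∀ (message : String), Dom_sanitize_log_message message → Spec_sanitize_log_message message (sanitize_log_message message)

-- ===== LEMMAS AND PROOFS =====

-- replacing a single character by a single character is a map
theorem pv_replace_go_single (a b : Char) :
    ∀ (l acc : List Char) (fuel : Nat), l.length ≤ fuel →
      PySem.Chars.replace.go [a] [b] fuel l acc
        = acc.reverse ++ l.map (fun c => if c = a then b else c) := by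
  intro l
  induction l with
  | nil =>
    intro acc fuel _
    cases fuel <;> simp [PySem.Chars.replace.go]
  | cons c t ih =>
    intro acc fuel hf
    cases fuel with
    | zero => simp at hf
    | succ n =>
      by_cases hc : c = a
      · subst hc
        have hp : ([c].isPrefixOf (c :: t)) = true := by simp [List.isPrefixOf]
        simp only [PySem.Chars.replace.go, hp, if_true]
        show PySem.Chars.replace.go [c] [b] n t (b :: acc) = _
        rw [ih (b :: acc) n (by simpa using hf)]
        simp
      · have hp : ([a].isPrefixOf (c :: t)) = false := by
          simp [List.isPrefixOf, Ne.symm hc]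
        simp only [PySem.Chars.replace.go, hp, Bool.false_eq_true, if_false]
        rw [ih (c :: acc) n (by simpa using hf)]
        simp [hc]

theorem pv_replace_single (a b : Char) (cs : List Char) :
    PySem.Chars.replace cs [a] [b] = cs.map (fun c => if c = a then b else c) := by
  unfold PySem.Chars.replace
  simpa using pv_replace_go_single a b cs [] cs.length le_rfl

def pvTableLit : PySem.Dict Int (Option Char) :=
  PySem.Dict.mk [(0, none), (1, none), (2, none), (3, none), (4, none), (5, none),
    (6, none), (7, none), (8, none), (9, none), (10, some ' '), (11, none),
    (12, none), (13, some ' '), (14, none), (15, none), (16, none), (17, none),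
    (18, none), (19, none), (20, none), (21, none), (22, none), (23, none),
    (24, none), (25, none), (26, none), (27, none), (28, none), (29, none),
    (30, none), (31, none)]

theorem pvSanitizeTable_eq : pvSanitizeTable = pvTableLit := by decide

theorem pvTable_get_large (n : Int) (hn : 32 ≤ n) : pvTableLit.get? n = none := by
  simp only [pvTableLit, PySem.Dict.get?_mk_cons]
  have beqf : ∀ m : Int, m < 32 → (m == n) = false := by
    intro m hm
    simp only [beq_eq_false_iff_ne, ne_eq]
    omega
  rw [beqf 0 (by omega), beqf 1 (by omega), beqf 2 (by omega), beqf 3 (by omega),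
      beqf 4 (by omega), beqf 5 (by omega), beqf 6 (by omega), beqf 7 (by omega),
      beqf 8 (by omega), beqf 9 (by omega), beqf 10 (by omega), beqf 11 (by omega),
      beqf 12 (by omega), beqf 13 (by omega), beqf 14 (by omega), beqf 15 (by omega),
      beqf 16 (by omega), beqf 17 (by omega), beqf 18 (by omega), beqf 19 (by omega),
      beqf 20 (by omega), beqf 21 (by omega), beqf 22 (by omega), beqf 23 (by omega),
      beqf 24 (by omega), beqf 25 (by omega), beqf 26 (by omega), beqf 27 (by omega),
      beqf 28 (by omega), beqf 29 (by omega), beqf 30 (by omega), beqf 31 (by omega)]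
  simp [PySem.Dict.get?]

theorem pv_char_of_toNat (c : Char) (d : Char) (h : c.toNat = d.toNat) : c = d := by
  have h1 := Char.ofNat_toNat c
  have h2 := Char.ofNat_toNat d
  rw [h, h2] at h1
  exact h1.symm

-- per-character agreement of the two pipelines on domain characters
theorem pv_char_step (c : Char) (h : pvDomChar c = true) :
    (if (decide (32 ≤ ((if (if c = '\n' then ' ' else c) = '\r' then ' '
          else (if c = '\n' then ' ' else c)).toNat : Nat) : Prop)
        || ((if (if c = '\n' then ' ' else c) = '\r' then ' '
          else (if c = '\n' then ' ' else c)) == ' ')) = true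
      then [if (if c = '\n' then ' ' else c) = '\r' then ' '
          else (if c = '\n' then ' ' else c)] else [])
    = pvStep pvTableLit c := by
  simp only [pvDomChar, Bool.or_eq_true, Bool.and_eq_true, decide_eq_true_eq, beq_iff_eq] at h
  have h' : (32 ≤ c.toNat ∧ c.toNat ≤ 126) ∨ c.toNat = 9 ∨ c.toNat = 10 ∨ c.toNat = 13 := by
    tauto
  rcases h' with ⟨h32, _⟩ | h9 | h10 | h13
  · -- code ≥ 32 : kept by A, key absent for B
    have hn : c ≠ '\n' := by intro hc; rw [hc] at h32; exact absurd h32 (by decide)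
    have hr : c ≠ '\r' := by intro hc; rw [hc] at h32; exact absurd h32 (by decide)
    simp only [pvStep, pvTable_get_large (c.toNat : Int) (by exact_mod_cast h32)]
    simp [hn, hr, h32]
  · rw [pv_char_of_toNat c '\t' (by simpa using h9)]; decide
  · rw [pv_char_of_toNat c '\n' (by simpa using h10)]; decide
  · rw [pv_char_of_toNat c '\r' (by simpa using h13)]; decide

theorem pv_core_eq (cs : List Char) (h : cs.all pvDomChar = true) :
    ((cs.map (fun c => if c = '\n' then ' ' else c)).map
        (fun c => if c = '\r' then ' ' else c)).filter
      (fun c => decide (32 ≤ c.toNat) || c == ' ')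
    = pvTranslate pvTableLit cs := by
  induction cs with
  | nil => rfl
  | cons c t ih =>
    simp only [List.all_cons, Bool.and_eq_true] at h
    have htr : pvTranslate pvTableLit (c :: t)
        = pvStep pvTableLit c ++ pvTranslate pvTableLit t := by
      simp [pvTranslate]
    rw [List.map_cons, List.map_cons, List.filter_cons, htr,
        ← pv_char_step c h.1, ← ih h.2]
    split_ifs <;> simp

-- ===== VERDICT (by name: the statement is the Claim_ definition above) =====
theorem sanitize_log_message_spec : Claim_equal_sanitize_log_message := by
  intro message hdom
  unfold Spec_sanitize_log_message sanitize_log_message sanitize_log_message_alt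
  by_cases hm : message = ""
  · simp [hm]
  · rw [if_neg hm, if_neg hm]
    have hdom' : message.toList.all pvDomChar = true := hdom
    have hrep : (PySem.Str.replace (PySem.Str.replace message "\n" " ") "\r" " ").toList
        = (message.toList.map (fun c => if c = '\n' then ' ' else c)).map
            (fun c => if c = '\r' then ' ' else c) := by
      simp only [PySem.Str.replace]
      rw [String.toList_ofList, String.toList_ofList]
      rw [show ("\n" : String).toList = ['\n'] from rfl,
          show ("\r" : String).toList = ['\r'] from rfl,
          show (" " : String).toList = [' '] from rfl]
      rw [pv_replace_single, pv_replace_single]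
    have hcore := pv_core_eq message.toList hdom'
    rw [← pvSanitizeTable_eq] at hcore
    have hslice : ∀ xs : List Char, PySem.List.slice xs none (some 1000) = xs.take 1000 := by
      intro xs
      simpa using PySem.List.slice_to_natCast (xs := xs) (b := 1000)
    set core := pvTranslate pvSanitizeTable message.toList with hcdef
    have hfilt : (PySem.Str.replace (PySem.Str.replace message "\n" " ") "\r" " ").toList.filter
        (fun c => decide (32 ≤ c.toNat) || c == ' ') = core := by
      rw [hrep]; exact hcore
    simp only [PySem.Str.len, String.toList_ofList, hfilt, hslice]
    by_cases hlen : 1000 < core.length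
    · rw [if_pos (by exact_mod_cast hlen)]
    · rw [if_neg (by exact_mod_cast hlen)]
      rw [List.take_of_length_le (by omega)]
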